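-- pv_equiv track=rewrite | github.com/aenealabs/aura | tests/test_cognitive_memory_holdout_validation.py | _domains_related
-- ===== SOURCE A (Python) =====
-- def _domains_related(domain1: str, domain2: str) -> bool:
--     """Check if two domains are related."""
--     related_groups = [
--         {"CICD", "CFN", "KUBERNETES"},
--         {"IAM", "SECURITY"},
--         {"CFN", "IAM"},
--     ]
--     for group in related_groups:
--         if domain1 in group and domain2 in group:
--             return True
--     return False
-- ===== SOURCE B (Python) =====
-- _ADJ = {}
-- for _g in (("CICD", "CFN", "KUBERNETES"), ("IAM", "SECURITY"), ("CFN", "IAM")):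
--     for _d in _g:
--         _ADJ.setdefault(_d, set()).update(_g)
--
--
-- def _domains_related(domain1: str, domain2: str) -> bool:
--     """Check if two domains are related."""
--     return domain2 in _ADJ.get(domain1, set())
-- ===== Notes on version B (the rewrite author's own statement) =====
-- stated objective: alternative
-- what changed: A scans the list of related groups at every query; B precomputes once a dict mapping each domain to the set of all domains sharing a group with it, and answers each query with a single dict lookup plus one set-membership test.
import Mathlib
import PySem

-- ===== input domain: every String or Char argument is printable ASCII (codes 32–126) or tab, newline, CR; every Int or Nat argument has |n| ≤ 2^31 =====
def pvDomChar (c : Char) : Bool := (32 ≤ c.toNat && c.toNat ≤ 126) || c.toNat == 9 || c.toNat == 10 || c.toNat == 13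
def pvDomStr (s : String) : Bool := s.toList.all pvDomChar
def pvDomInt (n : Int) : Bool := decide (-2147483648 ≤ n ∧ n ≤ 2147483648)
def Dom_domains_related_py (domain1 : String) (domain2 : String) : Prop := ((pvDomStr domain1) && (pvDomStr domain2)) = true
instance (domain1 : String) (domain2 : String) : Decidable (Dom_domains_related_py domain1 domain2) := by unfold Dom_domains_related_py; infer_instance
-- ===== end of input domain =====

-- B precomputes a domain→related-domains adjacency table once and answers each query with a single lookup (objective: alternative).


-- ===== PORT A =====
def pvGroupsA : List (PySem.Set String) :=
  [PySem.Set.ofList ["CICD", "CFN", "KUBERNETES"],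
   PySem.Set.ofList ["IAM", "SECURITY"],
   PySem.Set.ofList ["CFN", "IAM"]]

-- the 'for group in related_groups' loop with its early return
def pvLoopA (groups : List (PySem.Set String)) (domain1 domain2 : String) : Bool :=
  match groups with
  | [] => false
  | g :: rest => if PySem.Set.contains g domain1 && PySem.Set.contains g domain2 then true
                 else pvLoopA rest domain1 domain2

def domains_related_py (domain1 : String) (domain2 : String) : Bool :=
  pvLoopA pvGroupsA domain1 domain2

-- ===== PORT B =====
-- module-level table build: for each group, for each member d, _ADJ.setdefault(d, set()).update(group)
def pvAdj : PySem.Dict String (PySem.Set String) :=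
  [["CICD", "CFN", "KUBERNETES"], ["IAM", "SECURITY"], ["CFN", "IAM"]].foldl
    (fun d g => g.foldl
      (fun d x => PySem.Dict.modify d x PySem.Set.empty (fun s => PySem.Set.update s g)) d)
    PySem.Dict.empty

def domains_related_py_alt (domain1 : String) (domain2 : String) : Bool :=
  PySem.Set.contains (PySem.Dict.getD pvAdj domain1 PySem.Set.empty) domain2

-- ===== PRECONDITION & SPEC =====
def Spec_domains_related_py (domain1 : String) (domain2 : String) (out : Bool) : Prop := out = domains_related_py_alt domain1 domain2
instance (domain1 : String) (domain2 : String) (out : Bool) : Decidable (Spec_domains_related_py domain1 domain2 out) := by unfold Spec_domains_related_py; infer_instance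

-- ===== CLAIM (what is proved, stated in full; the proofs are below) =====
def Claim_equal_domains_related_py : Prop := ∀ (domain1 : String) (domain2 : String), Dom_domains_related_py domain1 domain2 → Spec_domains_related_py domain1 domain2 (domains_related_py domain1 domain2)

-- ===== LEMMAS AND PROOFS =====
-- all domain names mentioned by either program
def pvKeys : List String := ["CICD", "CFN", "KUBERNETES", "IAM", "SECURITY"]

lemma pvA_false_of_not_key1 (d1 d2 : String) (h : d1 ∉ pvKeys) :
    domains_related_py d1 d2 = false := by
  simp [pvKeys] at h
  obtain ⟨h1, h2, h3, h4, h5⟩ := h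
  simp [domains_related_py, pvLoopA, pvGroupsA, PySem.Set.contains, PySem.Set.ofList,
        PySem.Set.add, h1, h2, h3, h4, h5]

lemma pvB_false_of_not_key1 (d1 d2 : String) (h : d1 ∉ pvKeys) :
    domains_related_py_alt d1 d2 = false := by
  simp [pvKeys] at h
  obtain ⟨h1, h2, h3, h4, h5⟩ := h
  have e1 : ("CICD" == d1) = false := by simp [Ne.symm h1]
  have e2 : ("CFN" == d1) = false := by simp [Ne.symm h2]
  have e3 : ("KUBERNETES" == d1) = false := by simp [Ne.symm h3]
  have e4 : ("IAM" == d1) = false := by simp [Ne.symm h4]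
  have e5 : ("SECURITY" == d1) = false := by simp [Ne.symm h5]
  simp [domains_related_py_alt, pvAdj, PySem.Dict.modify, PySem.Dict.getD, PySem.Dict.get?,
        PySem.Dict.insert, PySem.Dict.empty, PySem.Set.contains, List.find?,
        e1, e2, e3, e4, e5]

-- ===== VERDICT (by name: the statement is the Claim_ definition above) =====
theorem domains_related_py_spec : Claim_equal_domains_related_py := by
  intro d1 d2 _
  unfold Spec_domains_related_py
  by_cases h1 : d1 ∈ pvKeys
  · by_cases h2 : d2 ∈ pvKeys
    · simp [pvKeys] at h1 h2
      rcases h1 with rfl | rfl | rfl | rfl | rfl <;>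
        rcases h2 with rfl | rfl | rfl | rfl | rfl <;> decide
    · simp [pvKeys] at h1 h2
      obtain ⟨g1, g2, g3, g4, g5⟩ := h2
      rcases h1 with rfl | rfl | rfl | rfl | rfl <;>
        simp [domains_related_py, domains_related_py_alt, pvLoopA, pvGroupsA, pvAdj,
              PySem.Dict.modify, PySem.Dict.getD, PySem.Dict.get?, PySem.Dict.insert,
              PySem.Dict.empty, PySem.Set.contains, PySem.Set.ofList, PySem.Set.add,
              g1, g2, g3, g4, g5]
  · rw [pvA_false_of_not_key1 d1 d2 h1, pvB_false_of_not_key1 d1 d2 h1]
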